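-- pv_equiv track=rewrite | github.com/Hyunwoo0815/bus2 | hub.py | group_routes_by_departure
-- ===== SOURCE A (Python) =====
-- def group_routes_by_departure(routes):
--     """출발지별로 노선을 그룹화합니다."""
--     grouped = {}
--
--     for route in routes:
--         departure = route['departure']
--         if departure not in grouped:
--             grouped[departure] = []
--         grouped[departure].append(route)
--
--     # 도착지별로 정렬
--     for departure in grouped:
--         grouped[departure].sort(key=lambda x: x['arrival'])
--
--     return grouped
-- ===== SOURCE B (Python) =====
-- def group_routes_by_departure(routes):
--     """출발지별로 노선을 그룹화합니다."""
--     grouped = {}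
--     # keys in first-appearance order, as a plain dict insertion gives
--     for route in routes:
--         grouped.setdefault(route['departure'], [])
--     # one global stable sort by arrival; groups then fill up already sorted
--     for route in sorted(routes, key=lambda x: x['arrival']):
--         grouped[route['departure']].append(route)
--     return grouped
-- ===== Notes on version B (the rewrite author's own statement) =====
-- stated objective: alternative
-- what changed: Instead of grouping first and then sorting every group separately, B pre-seeds the keys in first-appearance order, sorts the whole routes list once by arrival, and fills the groups in a single pass, relying on sort stability so each group emerges already arrival-ordered.
import Mathlib
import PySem

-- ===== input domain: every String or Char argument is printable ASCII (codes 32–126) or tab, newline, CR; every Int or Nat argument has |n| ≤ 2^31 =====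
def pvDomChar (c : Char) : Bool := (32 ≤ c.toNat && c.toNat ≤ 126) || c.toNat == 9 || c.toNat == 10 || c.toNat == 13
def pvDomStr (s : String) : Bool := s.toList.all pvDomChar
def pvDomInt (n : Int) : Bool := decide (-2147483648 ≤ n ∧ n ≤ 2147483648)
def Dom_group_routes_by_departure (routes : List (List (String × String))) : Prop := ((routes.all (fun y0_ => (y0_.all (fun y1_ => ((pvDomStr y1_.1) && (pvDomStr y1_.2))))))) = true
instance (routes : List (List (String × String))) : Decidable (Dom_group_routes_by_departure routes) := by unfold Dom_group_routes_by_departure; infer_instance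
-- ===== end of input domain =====

-- B replaces A's "group, then sort each group" by "seed the keys, sort the whole list once
-- by arrival, fill the groups in one pass (stability keeps each group arrival-ordered)":
-- an alternative decomposition, proved to return the same dict (same key order, same groups).


-- ===== PORT A =====
-- route['k'] on the assoc-list dict; total form, used only under Pre_ (key present)
def pyStrGet (route : List (String × String)) (k : String) : String :=
  (PySem.Dict.mk route).getD k ""

def group_routes_by_departure (routes : List (List (String × String))) : List (String × List (List (String × String))) :=
  let grouped : PySem.Dict String (List (List (String × String))) :=
    routes.foldl (fun d route =>
      let dep := pyStrGet route "departure"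
      let d' := if d.contains dep then d else d.insert dep []
      d'.modify dep [] (fun v => v ++ [route])) PySem.Dict.empty
  -- for departure in grouped: grouped[departure].sort(key=lambda x: x['arrival'])
  let grouped2 :=
    grouped.keys.foldl (fun d dep =>
      d.modify dep [] (fun v => PySem.List.sorted v (fun r => pyStrGet r "arrival") false)) grouped
  grouped2.items

-- ===== PORT B =====
def group_routes_by_departure_alt (routes : List (List (String × String))) : List (String × List (List (String × String))) :=
  let seeded : PySem.Dict String (List (List (String × String))) :=
    routes.foldl (fun d route => d.setdefault (pyStrGet route "departure") []) PySem.Dict.empty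
  -- grouped[route['departure']].append(route); the key is always present after seeding,
  -- so the modify-with-default-[] is exact here
  let grouped :=
    (PySem.List.sorted routes (fun r => pyStrGet r "arrival") false).foldl
      (fun d route => d.modify (pyStrGet route "departure") [] (fun v => v ++ [route])) seeded
  grouped.items

-- ===== PRECONDITION & SPEC =====
-- Pre_ excludes exactly the inputs where the Python raises KeyError: some route missing
-- the key 'departure' or 'arrival' (both A and B subscript / sort-key every route).
def Pre_group_routes_by_departure (routes : List (List (String × String))) : Prop :=
  ∀ route ∈ routes, (PySem.Dict.mk route).contains "departure" = true ∧ (PySem.Dict.mk route).contains "arrival" = true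
instance (routes : List (List (String × String))) : Decidable (Pre_group_routes_by_departure routes) := by unfold Pre_group_routes_by_departure; infer_instance
def pvWitness_group_routes_by_departure : (List (List (String × String))) :=
  ([[("departure", "A"), ("arrival", "B")], [("departure", "A"), ("arrival", "C")]])

def Spec_group_routes_by_departure (routes : List (List (String × String))) (out : List (String × List (List (String × String)))) : Prop := out = group_routes_by_departure_alt routes
instance (routes : List (List (String × String))) (out : List (String × List (List (String × String)))) : Decidable (Spec_group_routes_by_departure routes out) := by unfold Spec_group_routes_by_departure; infer_instance

-- ===== CLAIM (what is proved, stated in full; the proofs are below) =====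
def Claim_equal_group_routes_by_departure : Prop := ∀ (routes : List (List (String × String))), Dom_group_routes_by_departure routes → Pre_group_routes_by_departure routes → Spec_group_routes_by_departure routes (group_routes_by_departure routes)

-- ===== LEMMAS AND PROOFS =====

-- abbreviations used by the proofs only
def pvDep (r : List (String × String)) : String := pyStrGet r "departure"
def pvArr (r : List (String × String)) : String := pyStrGet r "arrival"

-- A's first loop body equals a bare modify (insert-then-modify collapses)
theorem pv_stepA_eq (d : PySem.Dict String (List (List (String × String)))) (r : List (String × String)) :
    (let dep := pyStrGet r "departure"
     let d' := if d.contains dep then d else d.insert dep []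
     d'.modify dep [] (fun v => v ++ [r])) = d.modify (pvDep r) [] (fun v => v ++ [r]) := by
  show (if d.contains (pvDep r) then d else d.insert (pvDep r) []).modify (pvDep r) [] (fun v => v ++ [r])
      = d.modify (pvDep r) [] (fun v => v ++ [r])
  by_cases h : d.contains (pvDep r) = true
  · simp [h]
  · simp only [h, Bool.false_eq_true, reduceIte]
    simp [PySem.Dict.modify, PySem.Dict.insert_insert_self, PySem.Dict.getD_insert_self,
      PySem.Dict.getD_of_not_contains _ _ (by simpa using h)]

-- inserting an element strictly below every element of M goes to the head
theorem pv_insertBy_head {α κ : Type} [LinearOrder κ] (key : α → κ) (x : α) (M : List α)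
    (h : ∀ y ∈ M, key x < key y) :
    PySem.List.insertBy (fun a b => decide (key a < key b)) x M = x :: M := by
  cases M with
  | nil => rfl
  | cons m t => simp [PySem.List.insertBy, h m (by simp)]

-- filter commutes with a stable insertion into a key-sorted list
theorem pv_filter_insertBy {α κ : Type} [LinearOrder κ] (key : α → κ) (p : α → Bool) (x : α) (L : List α)
    (hL : L.Pairwise (fun a b => key a ≤ key b)) :
    (PySem.List.insertBy (fun a b => decide (key a < key b)) x L).filter p =
      if p x then PySem.List.insertBy (fun a b => decide (key a < key b)) x (L.filter p)
      else L.filter p := by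
  induction L with
  | nil => cases hp : p x <;> simp [PySem.List.insertBy, hp]
  | cons b t ih =>
    rcases List.pairwise_cons.mp hL with ⟨hb, ht⟩
    by_cases hlt : key x < key b
    · rw [show PySem.List.insertBy (fun a b => decide (key a < key b)) x (b :: t) = x :: b :: t by
        simp [PySem.List.insertBy, hlt]]
      have hhead : PySem.List.insertBy (fun a b => decide (key a < key b)) x ((b :: t).filter p)
          = x :: (b :: t).filter p := by
        apply pv_insertBy_head
        intro y hy
        have hy' := List.mem_of_mem_filter hy
        rcases List.mem_cons.mp hy' with rfl | hyt
        · exact hlt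
        · exact lt_of_lt_of_le hlt (hb y hyt)
      cases hp : p x
      · simp [List.filter_cons, hp]
      · simp only [if_pos]
        rw [hhead]
        simp [List.filter_cons, hp]
    · rw [show PySem.List.insertBy (fun a b => decide (key a < key b)) x (b :: t)
          = b :: PySem.List.insertBy (fun a b => decide (key a < key b)) x t by
        simp [PySem.List.insertBy, hlt]]
      have iht := ih ht
      cases hp : p x <;> cases hpb : p b <;>
        simp [hp, hpb, iht, PySem.List.insertBy, hlt]

-- filter commutes with the stable sort (stability is exactly what this rests on)
theorem pv_filter_sorted {α κ : Type} [LinearOrder κ] (key : α → κ) (p : α → Bool) (xs : List α) :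
    (PySem.List.sorted xs key false).filter p = PySem.List.sorted (xs.filter p) key false := by
  induction xs using List.reverseRecOn with
  | nil => rfl
  | append_singleton xs x ih =>
    rw [PySem.List.sorted_eq_foldl_insertBy (xs ++ [x]) key, List.foldl_append]
    simp only [List.foldl_cons, List.foldl_nil]
    rw [← PySem.List.sorted_eq_foldl_insertBy xs key,
        pv_filter_insertBy key p x _ (PySem.List.sorted_pairwise xs key), ih, List.filter_append]
    cases hp : p x
    · simp [hp]
    · simp only [List.filter_cons, hp, if_pos, List.filter_nil]
      rw [PySem.List.sorted_eq_foldl_insertBy (xs.filter p ++ [x]) key, List.foldl_append]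
      simp only [List.foldl_cons, List.foldl_nil]
      rw [← PySem.List.sorted_eq_foldl_insertBy (xs.filter p) key]

-- value of the canonical grouping fold
theorem pv_getD_group (l : List (List (String × String)))
    (d : PySem.Dict String (List (List (String × String)))) (c : String) :
    (l.foldl (fun d r => d.modify (pvDep r) [] (fun v => v ++ [r])) d).getD c [] =
      d.getD c [] ++ l.filter (fun r => pvDep r == c) := by
  have h := PySem.Dict.getD_foldl_modify_append (l.map (fun r => (pvDep r, r))) d c
  rw [List.foldl_map] at h
  rw [List.filter_map] at h
  simp only [List.map_map, Function.comp_def] at h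
  simpa using h

-- once-per-key modify loop over a Nodup key list
theorem pv_getD_foldl_modify_nodup (f : List (List (String × String)) → List (List (String × String)))
    (ks : List String) (d : PySem.Dict String (List (List (String × String)))) (c : String)
    (hnd : ks.Nodup) :
    (ks.foldl (fun d k => d.modify k [] f) d).getD c [] =
      if c ∈ ks then f (d.getD c []) else d.getD c [] := by
  induction ks generalizing d with
  | nil => simp
  | cons k t ih =>
    rcases List.nodup_cons.mp hnd with ⟨hk, ht⟩
    rw [List.foldl_cons, ih _ ht]
    by_cases hc : c ∈ t
    · have hck : c ≠ k := fun h => hk (h ▸ hc)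
      rw [PySem.Dict.getD_modify_of_ne _ _ _ hck]
      simp [hc]
    · by_cases hck : c = k
      · subst hck
        simp [hc, PySem.Dict.getD_modify_self]
      · rw [PySem.Dict.getD_modify_of_ne _ _ _ hck]
        simp [hc, hck]

-- seeded dict of B: every stored value is []
theorem pv_getD_seeded (l : List (List (String × String)))
    (d : PySem.Dict String (List (List (String × String)))) (c : String)
    (hd : ∀ c', d.getD c' [] = []) :
    (l.foldl (fun d r => d.setdefault (pvDep r) []) d).getD c [] = [] := by
  induction l generalizing d with
  | nil => exact hd c
  | cons r t ih =>
    rw [List.foldl_cons]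
    apply ih
    intro c'
    by_cases h : c' = pvDep r
    · subst h; rw [PySem.Dict.getD_setdefault_self]; exact hd _
    · rw [PySem.Dict.getD_eq_get?_getD, PySem.Dict.get?_setdefault_of_ne _ _ h,
        ← PySem.Dict.getD_eq_get?_getD]
      exact hd c'

-- seeded dict of B: keys in first-appearance order
theorem pv_keys_seeded (l : List (List (String × String)))
    (d : PySem.Dict String (List (List (String × String)))) :
    (l.foldl (fun d r => d.setdefault (pvDep r) []) d).keys = PySem.Set.update d.keys (l.map pvDep) := by
  induction l generalizing d with
  | nil => simp [PySem.Set.update]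
  | cons r t ih =>
    rw [List.foldl_cons, ih, List.map_cons, PySem.Set.update_cons]
    congr 1
    rw [PySem.Set.add_eq_ite]
    by_cases h : (d.contains (pvDep r)) = true
    · rw [PySem.Dict.setdefault_of_contains _ _ h, if_pos]
      rw [← PySem.Dict.contains_iff_mem_keys] at *
      exact h
    · rw [PySem.Dict.setdefault_of_not_contains _ _ (by simpa using h), if_neg,
        PySem.Dict.keys_insert_of_not_contains _ _ (by simpa using h)]
      rw [← PySem.Dict.contains_iff_mem_keys]
      simp [h]

-- Set.update that adds nothing new
theorem pv_set_update_of_subset (s : PySem.Set String) (l : List String)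
    (h : ∀ x ∈ l, x ∈ s) : PySem.Set.update s l = s := by
  rw [PySem.Set.update_eq_append_filter]
  have : List.filter (fun y => !PySem.Set.contains s y) (PySem.Set.ofList l) = [] := by
    apply List.filter_eq_nil_iff.mpr
    intro y hy
    rw [PySem.Set.mem_ofList] at hy
    simpa using h y hy
  rw [this, List.append_nil]

-- the two ports agree on every input
theorem pv_main (routes : List (List (String × String))) :
    group_routes_by_departure routes = group_routes_by_departure_alt routes := by
  have pvDep_def : ∀ r, pyStrGet r "departure" = pvDep r := fun _ => rfl
  have pvArr_def : ∀ r, pyStrGet r "arrival" = pvArr r := fun _ => rfl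
  -- the common normal form: keys in first-appearance order, each group arrival-sorted
  set M := (PySem.Set.ofList (routes.map pvDep)).map
      (fun k => (k, PySem.List.sorted (routes.filter (fun r => pvDep r == k)) pvArr false)) with hM
  have hA : group_routes_by_departure routes = M := by
    unfold group_routes_by_departure
    simp only [pv_stepA_eq, pvArr_def]
    set GA := routes.foldl (fun d r => d.modify (pvDep r) [] (fun v => v ++ [r]))
        (PySem.Dict.empty : PySem.Dict String (List (List (String × String)))) with hGA
    have hkeysGA : GA.keys = PySem.Set.ofList (routes.map pvDep) := by
      rw [hGA, PySem.Dict.keys_foldl_modify_key routes pvDep [] (fun _ r => (fun v => v ++ [r])),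
        PySem.Dict.keys_empty]
      exact PySem.Set.update_empty _
    have hndGA : GA.keys.Nodup := by rw [hkeysGA]; exact PySem.Set.nodup_ofList _
    have hgetGA : ∀ c, GA.getD c [] = routes.filter (fun r => pvDep r == c) := by
      intro c
      rw [hGA, pv_getD_group, PySem.Dict.getD_empty, List.nil_append]
    have hkeys2 : (GA.keys.foldl
        (fun d k => d.modify k [] (fun v => PySem.List.sorted v pvArr false)) GA).keys = GA.keys := by
      rw [PySem.Dict.keys_foldl_modify GA.keys [] (fun _ _ => (fun v => PySem.List.sorted v pvArr false))]
      exact pv_set_update_of_subset _ _ (fun x hx => hx)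
    rw [PySem.Dict.items_eq_map_keys _ (by rw [hkeys2]; exact hndGA) [], hkeys2, hM, hkeysGA]
    apply List.map_congr_left
    intro k hk
    rw [pv_getD_foldl_modify_nodup _ _ _ _ (PySem.Set.nodup_ofList _), if_pos hk, hgetGA]
  have hB : group_routes_by_departure_alt routes = M := by
    unfold group_routes_by_departure_alt
    simp only [pvDep_def, pvArr_def]
    set seeded := routes.foldl (fun d r => d.setdefault (pvDep r) [])
        (PySem.Dict.empty : PySem.Dict String (List (List (String × String)))) with hseed
    have hkeysSeed : seeded.keys = PySem.Set.ofList (routes.map pvDep) := by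
      rw [hseed, pv_keys_seeded, PySem.Dict.keys_empty]
      exact PySem.Set.update_empty _
    have hgetSeed : ∀ c, seeded.getD c [] = [] := by
      intro c
      rw [hseed]
      exact pv_getD_seeded _ _ _ (fun c' => PySem.Dict.getD_empty c' [])
    set GB := (PySem.List.sorted routes pvArr false).foldl
        (fun d r => d.modify (pvDep r) [] (fun v => v ++ [r])) seeded with hGB
    have hkeysGB : GB.keys = seeded.keys := by
      rw [hGB, PySem.Dict.keys_foldl_modify_key _ pvDep [] (fun _ r => (fun v => v ++ [r]))]
      apply pv_set_update_of_subset
      intro x hx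
      rw [hkeysSeed]
      rcases List.mem_map.mp hx with ⟨r, hr, rfl⟩
      rw [PySem.List.mem_sorted] at hr
      exact (PySem.Set.mem_ofList _ _).mpr (List.mem_map_of_mem hr)
    have hgetGB : ∀ c, GB.getD c [] =
        (PySem.List.sorted routes pvArr false).filter (fun r => pvDep r == c) := by
      intro c
      rw [hGB, pv_getD_group, hgetSeed, List.nil_append]
    rw [PySem.Dict.items_eq_map_keys _ (by rw [hkeysGB, hkeysSeed]; exact PySem.Set.nodup_ofList _) [],
      hkeysGB, hkeysSeed, hM]
    apply List.map_congr_left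
    intro k _
    rw [hgetGB, pv_filter_sorted]
  exact hA.trans hB.symm

-- ===== VERDICT (by name: the statement is the Claim_ definition above) =====
theorem group_routes_by_departure_spec : Claim_equal_group_routes_by_departure := by
  intro routes _ _
  unfold Spec_group_routes_by_departure
  exact pv_main routes
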